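-- pv_equiv track=rewrite | github.com/tonyaiuto/aoc | 2023/13/day13.py | is_reflect
-- ===== SOURCE A (Python) =====
-- def is_reflect(slice):
--   l = len(slice)
--   half = l // 2
--   if half * 2 != l:
--     return False
--   for i in range(half):
--     if slice[half-1-i] != slice[half+i]:
--       return False
--   return True
-- ===== SOURCE B (Python) =====
-- def is_reflect(slice):
--   if len(slice) % 2 != 0:
--     return False
--   half = len(slice) // 2
--   stack = []
--   for x in slice[:half]:
--     stack.append(x)
--   for x in slice[half:]:
--     if stack.pop() != x:
--       return False
--   return True
-- ===== Notes on version B (the rewrite author's own statement) =====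
-- stated objective: alternative
-- what changed: Replaces A's middle-out mirrored-index loop over the fixed list with a LIFO stack algorithm: push the first half onto a stack, then scan the second half popping the stack and comparing.
import Mathlib
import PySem

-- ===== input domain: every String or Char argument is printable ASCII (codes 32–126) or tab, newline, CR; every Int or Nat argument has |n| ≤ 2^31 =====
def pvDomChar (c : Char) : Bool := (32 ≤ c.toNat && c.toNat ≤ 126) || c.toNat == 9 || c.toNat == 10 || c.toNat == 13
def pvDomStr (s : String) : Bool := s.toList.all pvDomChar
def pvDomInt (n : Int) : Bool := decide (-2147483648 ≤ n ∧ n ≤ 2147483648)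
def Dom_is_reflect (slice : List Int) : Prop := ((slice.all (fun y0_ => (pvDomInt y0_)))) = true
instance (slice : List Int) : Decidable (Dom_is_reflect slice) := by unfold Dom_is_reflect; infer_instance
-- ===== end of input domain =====

-- B replaces A's middle-out mirrored-index loop with a LIFO-stack algorithm:
-- push the first half onto a stack, then scan the second half popping and comparing.

-- ===== PORT A =====
-- the 'for i in range(half)' loop with its early 'return False'
def isReflectLoop (slice : List Int) (half : Int) : List Int → Bool
  | [] => true
  | i :: rest =>
    if PySem.List.pyGet? slice (half - 1 - i) ≠ PySem.List.pyGet? slice (half + i) then false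
    else isReflectLoop slice half rest

def is_reflect (slice : List Int) : Bool :=
  let l : Int := slice.length
  let half : Int := PySem.Int.floordiv l 2
  if half * 2 ≠ l then false
  else isReflectLoop slice half (PySem.List.pyRange 0 half 1)

-- ===== PORT B =====
-- 'for x in second: if stack.pop() != x: return False' — stack top is the list's last element
def popLoop : List Int → List Int → Bool
  | _, [] => true
  | stack, x :: rest =>
    match PySem.List.pop? stack (-1) with
    | none => false        -- 'stack.pop()' on an empty stack raises; unreachable under the even-length guard
    | some (t, stack') => if t ≠ x then false else popLoop stack' rest

def is_reflect_alt (slice : List Int) : Bool :=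
  if PySem.Int.mod (slice.length : Int) 2 ≠ 0 then false
  else
    let half : Int := PySem.Int.floordiv (slice.length : Int) 2
    let stack := (PySem.List.slice slice none (some half)).foldl (fun st x => st ++ [x]) []
    popLoop stack (PySem.List.slice slice (some half) none)

-- ===== PRECONDITION & SPEC =====
def Spec_is_reflect (slice : List Int) (out : Bool) : Prop := out = is_reflect_alt slice
instance (slice : List Int) (out : Bool) : Decidable (Spec_is_reflect slice out) := by unfold Spec_is_reflect; infer_instance

-- ===== CLAIM (what is proved, stated in full; the proofs are below) =====
def Claim_equal_is_reflect : Prop := ∀ (slice : List Int), Dom_is_reflect slice → Spec_is_reflect slice (is_reflect slice)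

-- ===== LEMMAS AND PROOFS =====

theorem loop_true_iff (slice : List Int) (half : Int) (idxs : List Int) :
    isReflectLoop slice half idxs = true ↔
      ∀ i ∈ idxs, PySem.List.pyGet? slice (half - 1 - i) = PySem.List.pyGet? slice (half + i) := by
  induction idxs with
  | nil => simp [isReflectLoop]
  | cons i rest ih =>
    simp only [isReflectLoop]
    by_cases h : PySem.List.pyGet? slice (half - 1 - i) = PySem.List.pyGet? slice (half + i)
    · simp [h, ih]
    · simp [h]

theorem rev_eq_iff (xs : List Int) :
    (xs.reverse = xs) ↔ ∀ k : Nat, k < xs.length → xs[xs.length - 1 - k]? = xs[k]? := by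
  constructor
  · intro hr k hk
    conv_rhs => rw [← hr]
    rw [List.getElem?_reverse hk]
  · intro h
    apply List.ext_getElem?
    intro k
    by_cases hk : k < xs.length
    · rw [List.getElem?_reverse hk, h k hk]
    · rw [List.getElem?_eq_none (by simpa using not_lt.mp hk),
          List.getElem?_eq_none (by omega)]

theorem pairs_iff_rev (xs : List Int) (h : Nat) (hlen : xs.length = 2 * h) :
    (∀ i : Int, 0 ≤ i → i < (h : Int) →
        PySem.List.pyGet? xs ((h : Int) - 1 - i) = PySem.List.pyGet? xs ((h : Int) + i)) ↔
      xs.reverse = xs := by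
  rw [rev_eq_iff]
  constructor
  · intro hp k hk
    by_cases hkh : k < h
    · have := hp ((h - 1 - k : Nat) : Int) (by positivity) (by omega)
      have e1 : (h : Int) - 1 - ((h - 1 - k : Nat) : Int) = ((k : Nat) : Int) := by omega
      have e2 : (h : Int) + ((h - 1 - k : Nat) : Int) = ((xs.length - 1 - k : Nat) : Int) := by
        push_cast [hlen]; omega
      rw [e1, e2, PySem.List.pyGet?_natCast, PySem.List.pyGet?_natCast] at this
      exact this.symm
    · have := hp ((k - h : Nat) : Int) (by positivity) (by rw [hlen] at hk; omega)
      have e1 : (h : Int) - 1 - ((k - h : Nat) : Int) = ((xs.length - 1 - k : Nat) : Int) := by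
        push_cast [hlen]; omega
      have e2 : (h : Int) + ((k - h : Nat) : Int) = ((k : Nat) : Int) := by omega
      rw [e1, e2, PySem.List.pyGet?_natCast, PySem.List.pyGet?_natCast] at this
      exact this
  · intro hr i hi0 hih
    have e1 : (h : Int) - 1 - i = ((h - 1 - i.toNat : Nat) : Int) := by omega
    have e2 : (h : Int) + i = ((h + i.toNat : Nat) : Int) := by omega
    rw [e1, e2, PySem.List.pyGet?_natCast, PySem.List.pyGet?_natCast]
    have := hr (h + i.toNat) (by omega)
    have e3 : xs.length - 1 - (h + i.toNat) = h - 1 - i.toNat := by omega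
    rw [e3] at this
    exact this

-- popLoop with equally long stack and scan list checks 'stack.reverse = xs'
theorem popLoop_iff (xs : List Int) : ∀ stack : List Int, stack.length = xs.length →
    (popLoop stack xs = true ↔ stack.reverse = xs) := by
  induction xs with
  | nil =>
    intro stack hlen
    have : stack = [] := List.eq_nil_of_length_eq_zero hlen
    simp [this, popLoop]
  | cons x rest ih =>
    intro stack hlen
    obtain ⟨init, t, rfl⟩ : ∃ init t, stack = init ++ [t] := by
      rcases List.eq_nil_or_concat stack with h | ⟨init, t, h⟩
      · simp [h] at hlen
      · exact ⟨init, t, by simpa using h⟩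
    have hlin : init.length = rest.length := by
      simpa using hlen
    simp only [popLoop, PySem.List.pop?_last]
    by_cases ht : t = x
    · subst ht
      simp [List.reverse_append, ih init hlin]
    · simp [ht, List.reverse_append]

-- reversing the first half onto the second half ⟷ whole-list palindromicity
theorem half_rev_iff (xs : List Int) (h : Nat) (hlen : xs.length = 2 * h) :
    ((xs.take h).reverse = xs.drop h) ↔ xs.reverse = xs := by
  have hsplit : xs.take h ++ xs.drop h = xs := List.take_append_drop h xs
  have hlt : (xs.take h).length = h := by simp; omega
  have hld : (xs.drop h).length = h := by simp; omega
  constructor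
  · intro hr
    have hsw : xs.reverse = (xs.drop h).reverse ++ (xs.take h).reverse := by
      rw [← List.reverse_append, hsplit]
    rw [hsw, ← hr, List.reverse_reverse, hr, hsplit]
  · intro hp
    have : (xs.drop h).reverse ++ (xs.take h).reverse = xs.take h ++ xs.drop h := by
      rw [← List.reverse_append, hsplit, hp]
    have hinj := List.append_inj this (by simp; omega)
    rw [← hinj.1, List.reverse_reverse]

-- ===== VERDICT (by name: the statement is the Claim_ definition above) =====
theorem is_reflect_spec : Claim_equal_is_reflect := by
  intro slice _
  unfold Spec_is_reflect
  simp only [is_reflect, is_reflect_alt]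
  have hfd : PySem.Int.floordiv (slice.length : Int) 2 = ((slice.length / 2 : Nat) : Int) := by
    simp only [PySem.Int.floordiv, Int.fdiv_eq_ediv]
    norm_num
  have hmod : PySem.Int.mod (slice.length : Int) 2 = ((slice.length % 2 : Nat) : Int) := by
    simp only [PySem.Int.mod, Int.fmod_eq_emod]
    norm_num
  rw [hfd, hmod]
  by_cases hev : slice.length % 2 = 0
  · have hg1 : ¬ (((slice.length / 2 : Nat) : Int) * 2 ≠ (slice.length : Int)) := by omega
    have hg2 : ¬ (((slice.length % 2 : Nat) : Int) ≠ 0) := by omega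
    rw [if_neg hg1, if_neg hg2]
    set h : Nat := slice.length / 2 with hh
    have h2 : slice.length = 2 * h := by omega
    have hA : isReflectLoop slice ((h : Nat) : Int)
        (PySem.List.pyRange 0 ((h : Nat) : Int) 1) = true ↔ slice.reverse = slice := by
      rw [loop_true_iff]
      constructor
      · intro hp
        exact (pairs_iff_rev slice _ h2).mp
          (fun i hi0 hih => hp i (PySem.List.mem_pyRange_one.mpr ⟨hi0, hih⟩))
      · intro hr i hi
        obtain ⟨hi0, hih⟩ := PySem.List.mem_pyRange_one.mp hi
        exact (pairs_iff_rev slice _ h2).mpr hr i hi0 hih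
    have hslt : PySem.List.slice slice none (some ((h : Nat) : Int)) = slice.take h :=
      PySem.List.slice_to_natCast slice h
    have hslf : PySem.List.slice slice (some ((h : Nat) : Int)) none = slice.drop h :=
      PySem.List.slice_from_natCast slice h
    have hfold : (slice.take h).foldl (fun st x => st ++ [x]) ([] : List Int) = slice.take h := by
      rw [PySem.List.foldl_append_singleton_eq_self]; simp
    have hB : popLoop
        ((PySem.List.slice slice none (some ((h : Nat) : Int))).foldl (fun st x => st ++ [x]) [])
        (PySem.List.slice slice (some ((h : Nat) : Int)) none) = true ↔
        slice.reverse = slice := by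
      rw [hslt, hslf, hfold,
        popLoop_iff (slice.drop h) (slice.take h) (by simp; omega)]
      exact half_rev_iff slice h h2
    rw [Bool.eq_iff_iff, hA]
    exact hB.symm
  · have hg1 : (((slice.length / 2 : Nat) : Int) * 2 ≠ (slice.length : Int)) := by omega
    have hg2 : (((slice.length % 2 : Nat) : Int) ≠ 0) := by omega
    rw [if_pos hg1, if_pos hg2]
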